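-- pv_equiv track=rewrite | github.com/AsheeHuang/NSP | NSP_GA/Local_search.py | fitness_OffDayOver3
-- ===== SOURCE A (Python) =====
-- def fitness_OffDayOver3(schedule):
--     sum_OffDayOver3 = 0
--     OffDayCount = 0
--     for i in range(0, len(schedule)):
--         for j in range(0, len(schedule[0])):
--             if (j % 4 == 3):
--                 if (schedule[i][j] == 1):
--                     OffDayCount += 1
--                     if (OffDayCount >= 3):
--                         sum_OffDayOver3 += 1
--                 else:
--                     OffDayCount = 0
--
--     return sum_OffDayOver3
-- ===== SOURCE B (Python) =====
-- def _runs(xs):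
--     """Run-length encoding of xs as a list of (value, count) pairs."""
--     out = []
--     i = 0
--     while i < len(xs):
--         j = i
--         while j < len(xs) and xs[j] == xs[i]:
--             j += 1
--         out.append((xs[i], j - i))
--         i = j
--     return out
--
--
-- def fitness_OffDayOver3(schedule):
--     cells = [schedule[i][j]
--              for i in range(len(schedule))
--              for j in range(len(schedule[0]))
--              if j % 4 == 3]
--     return sum(max(0, n - 2) for v, n in _runs(cells) if v == 1)
-- ===== Notes on version B (the rewrite author's own statement) =====
-- stated objective: alternative
-- what changed: Replaces A's incremental running off-day counter threaded through nested index loops by extracting the j%4==3 cell stream, run-length encoding it, and summing max(0, runlen-2) over the runs of 1s.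
import Mathlib
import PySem

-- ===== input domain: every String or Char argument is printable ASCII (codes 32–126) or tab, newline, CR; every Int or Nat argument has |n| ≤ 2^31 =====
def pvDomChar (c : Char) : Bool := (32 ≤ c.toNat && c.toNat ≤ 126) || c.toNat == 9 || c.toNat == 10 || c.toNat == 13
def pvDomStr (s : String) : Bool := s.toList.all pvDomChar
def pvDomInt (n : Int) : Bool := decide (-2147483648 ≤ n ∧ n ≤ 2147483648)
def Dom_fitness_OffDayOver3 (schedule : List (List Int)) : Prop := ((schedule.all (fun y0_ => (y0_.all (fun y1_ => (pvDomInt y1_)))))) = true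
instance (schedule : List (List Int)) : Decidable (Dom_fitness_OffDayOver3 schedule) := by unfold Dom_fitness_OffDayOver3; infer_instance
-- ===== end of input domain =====

-- B replaces A's incremental running off-day counter with an explicit run-length
-- encoding of the relevant cell stream followed by a sum of max(0, runlen-2)
-- over runs of 1s (objective: alternative decomposition, same single-pass cost).

-- ===== PORT A =====
def fitness_OffDayOver3 (schedule : List (List Int)) : Int :=
  -- nested for-loops with state (sum_OffDayOver3, OffDayCount)
  (((PySem.List.pyRange 0 schedule.length 1).foldl (fun st i =>
      (PySem.List.pyRange 0 (schedule.headD []).length 1).foldl (fun st j =>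
        if j % 4 == 3 then
          if PySem.List.pyGetD (PySem.List.pyGetD schedule i []) j 0 == 1 then
            (st.1 + (if st.2 + 1 ≥ 3 then 1 else 0), st.2 + 1)
          else (st.1, 0)
        else st) st) ((0 : Int), (0 : Int))) : Int × Int).1

-- ===== PORT B =====
-- run-length encoding (the two nested while loops of _runs in Source B)
def pvRuns : List Int → List (Int × Nat)
  | [] => []
  | x :: xs =>
    (x, (xs.takeWhile (· == x)).length + 1) :: pvRuns (xs.dropWhile (· == x))
  termination_by xs => xs.length
  decreasing_by
    have := List.length_dropWhile_le (· == x) xs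
    simp only [List.length_cons]
    omega

def pvCells (schedule : List (List Int)) : List Int :=
  (PySem.List.pyRange 0 schedule.length 1).flatMap (fun i =>
    (PySem.List.pyRange 0 (schedule.headD []).length 1).filterMap (fun j =>
      if j % 4 == 3 then some (PySem.List.pyGetD (PySem.List.pyGetD schedule i []) j 0)
      else none))

def fitness_OffDayOver3_alt (schedule : List (List Int)) : Int :=
  (((pvRuns (pvCells schedule)).filter (fun r => r.1 == 1)).map
    (fun r => max 0 ((r.2 : Int) - 2))).sum

-- ===== PRECONDITION & SPEC =====
-- Pre_ excludes exactly the ragged schedules on which A raises IndexError: some row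
-- is too short for an accessed column (j < len(schedule[0]) with j % 4 == 3).
def Pre_fitness_OffDayOver3 (schedule : List (List Int)) : Prop :=
  ∀ row ∈ schedule, ∀ j ∈ List.range (schedule.headD []).length,
    j % 4 = 3 → j < row.length
instance (schedule : List (List Int)) : Decidable (Pre_fitness_OffDayOver3 schedule) := by
  unfold Pre_fitness_OffDayOver3; infer_instance

def pvWitness_fitness_OffDayOver3 : List (List Int) :=
  [[0, 1, 0, 1], [0, 0, 0, 1], [1, 1, 1, 1]]

def Spec_fitness_OffDayOver3 (schedule : List (List Int)) (out : Int) : Prop := out = fitness_OffDayOver3_alt schedule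
instance (schedule : List (List Int)) (out : Int) : Decidable (Spec_fitness_OffDayOver3 schedule out) := by unfold Spec_fitness_OffDayOver3; infer_instance

-- ===== CLAIM (what is proved, stated in full; the proofs are below) =====
def Claim_equal_fitness_OffDayOver3 : Prop := ∀ (schedule : List (List Int)), Dom_fitness_OffDayOver3 schedule → Pre_fitness_OffDayOver3 schedule → Spec_fitness_OffDayOver3 schedule (fitness_OffDayOver3 schedule)

-- ===== LEMMAS AND PROOFS =====

-- the state transformer of A's innermost branch, on an already-extracted cell value
def pvStep (st : Int × Int) (x : Int) : Int × Int :=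
  if x == 1 then (st.1 + (if st.2 + 1 ≥ 3 then 1 else 0), st.2 + 1) else (st.1, 0)

theorem foldl_if_filterMap {ι : Type} (p : ι → Bool) (f : ι → Int) :
    ∀ (l : List ι) (init : Int × Int),
      l.foldl (fun st j => if p j then pvStep st (f j) else st) init
        = (l.filterMap (fun j => if p j then some (f j) else none)).foldl pvStep init := by
  intro l
  induction l with
  | nil => intro init; simp
  | cons a l ih =>
    intro init
    by_cases h : p a <;> simp [h, ih]

theorem foldl_foldl_flatMap {ι : Type} (g : ι → List Int) :
    ∀ (l : List ι) (init : Int × Int),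
      l.foldl (fun st i => (g i).foldl pvStep st) init
        = (l.flatMap g).foldl pvStep init := by
  intro l
  induction l with
  | nil => intro init; simp
  | cons a l ih => intro init; simp [ih, List.foldl_append]

theorem foldl_step_replicate_one (k : Nat) :
    ∀ (s c : Int), 0 ≤ c →
      (List.replicate k (1 : Int)).foldl pvStep (s, c)
        = (s + max 0 (c + k - 2) - max 0 (c - 2), c + k) := by
  induction k with
  | zero => intro s c hc; simp
  | succ k ih =>
    intro s c hc
    rw [List.replicate_succ, List.foldl_cons]
    show (List.replicate k (1 : Int)).foldl pvStep
        (s + (if c + 1 ≥ 3 then 1 else 0), c + 1) = _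
    rw [ih _ (c + 1) (by omega)]
    rw [Prod.mk.injEq]
    refine ⟨?_, ?_⟩
    · push_cast; split_ifs <;> omega
    · push_cast; omega

theorem foldl_step_replicate_ne (x : Int) (hx : ¬ x = 1) (k : Nat) :
    ∀ (s : Int), (List.replicate k x).foldl pvStep (s, 0) = (s, 0) := by
  induction k with
  | zero => intro s; simp
  | succ k ih =>
    intro s
    rw [List.replicate_succ, List.foldl_cons]
    have : pvStep (s, 0) x = (s, 0) := by simp [pvStep, hx]
    rw [this, ih]

-- a non-1 first element makes the counter component irrelevant
theorem foldl_step_reset (d : List Int) (hd : ∀ y ∈ d.head?, ¬ y = 1) (s c : Int) :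
    (d.foldl pvStep (s, c)).1 = (d.foldl pvStep (s, 0)).1 := by
  cases d with
  | nil => rfl
  | cons y d' =>
    have hy : ¬ y = 1 := hd y rfl
    simp only [List.foldl_cons]
    have h1 : pvStep (s, c) y = (s, 0) := by simp [pvStep, hy]
    have h2 : pvStep (s, 0) y = (s, 0) := by simp [pvStep, hy]
    rw [h1, h2]

-- main invariant: A's counter fold equals B's sum over runs
theorem foldl_step_eq_runs :
    ∀ (cells : List Int) (s : Int),
      (cells.foldl pvStep (s, 0)).1
        = s + (((pvRuns cells).filter (fun r => r.1 == 1)).map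
            (fun r => max 0 ((r.2 : Int) - 2))).sum := by
  intro cells
  induction cells using pvRuns.induct with
  | case1 => intro s; simp [pvRuns]
  | case2 x xs ih =>
    intro s
    have ht : xs.takeWhile (· == x)
        = List.replicate (xs.takeWhile (· == x)).length x := by
      apply List.eq_replicate_of_mem
      intro b hb
      have := List.mem_takeWhile_imp hb
      simpa using this
    have hsplit : x :: xs
        = List.replicate ((xs.takeWhile (· == x)).length + 1) x
            ++ xs.dropWhile (· == x) := by
      conv_rhs => rw [List.replicate_succ, List.cons_append, ← ht,
        List.takeWhile_append_dropWhile]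
    have hd : ∀ y ∈ (xs.dropWhile (· == x)).head?, ¬ y = x := by
      intro y hy
      have h := List.head?_dropWhile_not (· == x) xs
      rw [Option.mem_def] at hy
      rw [hy] at h
      simpa using h
    rw [pvRuns]
    by_cases hx : x = 1
    · subst hx
      conv_lhs => rw [hsplit]
      rw [List.foldl_append, foldl_step_replicate_one _ s 0 (le_refl 0),
        foldl_step_reset _ hd, ih]
      simp only [List.filter_cons]
      norm_num
      omega
    · conv_lhs => rw [hsplit]
      rw [List.foldl_append, foldl_step_replicate_ne x hx, ih]
      have hf : ((x, (xs.takeWhile (· == x)).length + 1).1 == (1:Int)) = false := by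
        simp [hx]
      simp [hf]

-- A's double loop, rewritten as a single fold of pvStep over pvCells
theorem fitness_eq_foldl_cells (schedule : List (List Int)) :
    fitness_OffDayOver3 schedule = ((pvCells schedule).foldl pvStep ((0:Int), (0:Int))).1 := by
  unfold fitness_OffDayOver3 pvCells
  congr 1
  have hin : ∀ (i : Int) (st : Int × Int),
      (PySem.List.pyRange 0 (schedule.headD []).length 1).foldl (fun st j =>
        if j % 4 == 3 then
          if PySem.List.pyGetD (PySem.List.pyGetD schedule i []) j 0 == 1 then
            (st.1 + (if st.2 + 1 ≥ 3 then 1 else 0), st.2 + 1)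
          else (st.1, 0)
        else st) st
      = ((PySem.List.pyRange 0 (schedule.headD []).length 1).filterMap (fun j =>
          if j % 4 == 3 then some (PySem.List.pyGetD (PySem.List.pyGetD schedule i []) j 0)
          else none)).foldl pvStep st := by
    intro i st
    rw [← foldl_if_filterMap (fun j => j % 4 == 3)
      (fun j => PySem.List.pyGetD (PySem.List.pyGetD schedule i []) j 0)]
    rfl
  calc (PySem.List.pyRange 0 schedule.length 1).foldl _ ((0:Int), (0:Int))
      = (PySem.List.pyRange 0 schedule.length 1).foldl (fun st i =>
          (((PySem.List.pyRange 0 (schedule.headD []).length 1).filterMap (fun j =>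
            if j % 4 == 3 then some (PySem.List.pyGetD (PySem.List.pyGetD schedule i []) j 0)
            else none))).foldl pvStep st) ((0:Int), (0:Int)) := by
        apply List.foldl_ext
        intro st i _
        exact hin i st
    _ = _ := foldl_foldl_flatMap _ _ _

-- ===== VERDICT (by name: the statement is the Claim_ definition above) =====
theorem fitness_OffDayOver3_spec : Claim_equal_fitness_OffDayOver3 := by
  intro schedule _ _
  unfold Spec_fitness_OffDayOver3 fitness_OffDayOver3_alt
  rw [fitness_eq_foldl_cells, foldl_step_eq_runs (pvCells schedule) 0, zero_add]
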